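-- pv_equiv track=rewrite | github.com/Zahid-Ham/Matrix-Cyber | backend/agents/waf_evasion.py | _unicode_variations
-- ===== SOURCE A (Python) =====
-- from typing import List, Dict, Callable, Optional, Set, Tuple
--
-- def _unicode_variations(payload: str) -> List[str]:
--     """Unicode encoding variations."""
--     variations = []
--
--     # Unicode escapes (JavaScript style)
--     if len(payload) < 50:
--         unicode_js = ''.join(f'\\u{ord(c):04x}' for c in payload)
--         variations.append(unicode_js)
--
--     # Overlong UTF-8 (historically bypassed filters)
--     overlong_map = {
--         '<': '%C0%BC',
--         '>': '%C0%BE',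
--         "'": '%C0%A7',
--         '"': '%C0%A2',
--         '/': '%C0%AF',
--         '\\': '%C0%5C'
--     }
--
--     overlong = payload
--     for char, replacement in overlong_map.items():
--         overlong = overlong.replace(char, replacement)
--     if overlong != payload:
--         variations.append(overlong)
--
--     # Wide Unicode (UTF-16 BE style)
--     try:
--         wide = ''.join(f'%u00{ord(c):02x}' if c.isascii() else c for c in payload)
--         if wide != payload:
--             variations.append(wide)
--     except Exception:
--         pass
--
--     return variations
-- ===== SOURCE B (Python) =====
-- from typing import List
-- def _unicode_variations(payload: str) -> List[str]:
--     """Unicode encoding variations (single pass over the characters)."""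
--     overlong_map = {
--         '<': '%C0%BC',
--         '>': '%C0%BE',
--         "'": '%C0%A7',
--         '"': '%C0%A2',
--         '/': '%C0%AF',
--         '\\': '%C0%5C'
--     }
--     js_parts = []
--     over_parts = []
--     wide_parts = []
--     over_changed = False
--     for c in payload:
--         js_parts.append(f'\\u{ord(c):04x}')
--         r = overlong_map.get(c)
--         if r is None:
--             over_parts.append(c)
--         else:
--             over_parts.append(r)
--             over_changed = True
--         wide_parts.append(f'%u00{ord(c):02x}' if c.isascii() else c)
--     variations = []
--     if len(payload) < 50:
--         variations.append(''.join(js_parts))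
--     if over_changed:
--         variations.append(''.join(over_parts))
--     wide = ''.join(wide_parts)
--     if wide != payload:
--         variations.append(wide)
--     return variations
-- ===== Notes on version B (the rewrite author's own statement) =====
-- stated objective: alternative
-- what changed: Replaces A's three separate passes over the payload (including six sequential full-string str.replace scans) with one fused loop over the characters that builds all three variants simultaneously, doing the overlong substitution by a single dict.get per character and tracking a changed flag instead of comparing the result string.
import Mathlib
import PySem

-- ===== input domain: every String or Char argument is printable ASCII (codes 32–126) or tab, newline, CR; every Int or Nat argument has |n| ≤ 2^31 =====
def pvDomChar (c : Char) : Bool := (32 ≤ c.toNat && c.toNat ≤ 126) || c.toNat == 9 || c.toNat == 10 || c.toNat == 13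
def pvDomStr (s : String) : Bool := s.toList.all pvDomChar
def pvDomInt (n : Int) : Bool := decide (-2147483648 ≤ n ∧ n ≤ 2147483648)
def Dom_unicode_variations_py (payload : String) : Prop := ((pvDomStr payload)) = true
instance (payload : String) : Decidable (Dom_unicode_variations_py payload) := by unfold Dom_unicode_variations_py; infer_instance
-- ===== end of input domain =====

-- B replaces A's three separate passes (six sequential full-string replaces among them)
-- with one fused loop building all three variants at once; alternative decomposition, same cost.

-- shared formatting helpers (both Pythons build f'\\u{ord(c):04x}' / f'%u00{ord(c):02x}' pieces)
def hexDigit (n : Nat) : Char := if n < 10 then Char.ofNat (48 + n) else Char.ofNat (87 + n)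

-- lowercase hex digits of n, no prefix (exact for Python's '{:x}' on naturals)
def hexChars (n : Nat) : List Char :=
  if _h : n < 16 then [hexDigit n] else hexChars (n / 16) ++ [hexDigit (n % 16)]
  decreasing_by exact Nat.div_lt_self (by omega) (by omega)

-- zero-pad on the left to width w (Python's '{:0wx}')
def pad0 (w : Nat) (l : List Char) : List Char := List.replicate (w - l.length) '0' ++ l

def jsEsc (c : Char) : List Char := '\\' :: 'u' :: pad0 4 (hexChars c.toNat)
def wideEsc (c : Char) : List Char := '%' :: 'u' :: '0' :: '0' :: pad0 2 (hexChars c.toNat)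

-- ===== PORT A =====
-- overlong_map.items() in insertion order
def overlongPairs : List (List Char × List Char) :=
  [(['<'], "%C0%BC".toList), (['>'], "%C0%BE".toList), (['\''], "%C0%A7".toList),
   (['"'], "%C0%A2".toList), (['/'], "%C0%AF".toList), (['\\'], "%C0%5C".toList)]

-- literal port of _unicode_variations; strings handled as their code-point lists
-- (Python str equality/len = list equality/length); ''.join of per-char pieces = flatMap;
-- c.isascii() = c.toNat < 128; the try/except never fires (the body cannot raise), omitted.
def unicode_variations_py (payload : String) : List String :=
  let s := payload.toList
  let variations : List String := []
  let variations := if s.length < 50 then variations ++ [String.ofList (s.flatMap jsEsc)] else variations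
  let overlong := overlongPairs.foldl (fun t p => PySem.Chars.replace t p.1 p.2) s
  let variations := if overlong ≠ s then variations ++ [String.ofList overlong] else variations
  let wide := s.flatMap (fun c => if c.toNat < 128 then wideEsc c else [c])
  let variations := if wide ≠ s then variations ++ [String.ofList wide] else variations
  variations

-- ===== PORT B =====
-- overlong_map.get(c)
def overGet (c : Char) : Option (List Char) :=
  if c = '<' then some "%C0%BC".toList
  else if c = '>' then some "%C0%BE".toList
  else if c = '\'' then some "%C0%A7".toList
  else if c = '"' then some "%C0%A2".toList
  else if c = '/' then some "%C0%AF".toList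
  else if c = '\\' then some "%C0%5C".toList
  else none

-- one iteration of B's fused loop (js_parts, over_parts, wide_parts, over_changed)
def altStep (acc : List (List Char) × List (List Char) × List (List Char) × Bool) (c : Char) :
    List (List Char) × List (List Char) × List (List Char) × Bool :=
  match acc with
  | (js, ov, wd, ch) =>
    let js := js ++ [jsEsc c]
    let (ov, ch) :=
      match overGet c with
      | some r => (ov ++ [r], true)
      | none => (ov ++ [[c]], ch)
    let wd := wd ++ [if c.toNat < 128 then wideEsc c else [c]]
    (js, ov, wd, ch)

-- literal port of B (Source B): single foldl over the characters, then assemble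
def unicode_variations_py_alt (payload : String) : List String :=
  let s := payload.toList
  match s.foldl altStep ([], [], [], false) with
  | (js, ov, wd, ch) =>
    let variations : List String := []
    let variations := if s.length < 50 then variations ++ [String.ofList js.flatten] else variations
    let variations := if ch then variations ++ [String.ofList ov.flatten] else variations
    let wide := wd.flatten
    let variations := if wide ≠ s then variations ++ [String.ofList wide] else variations
    variations

-- ===== PRECONDITION & SPEC =====
def Spec_unicode_variations_py (payload : String) (out : List String) : Prop := out = unicode_variations_py_alt payload
instance (payload : String) (out : List String) : Decidable (Spec_unicode_variations_py payload out) := by unfold Spec_unicode_variations_py; infer_instance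

-- ===== CLAIM (what is proved, stated in full; the proofs are below) =====
def Claim_equal_unicode_variations_py : Prop := ∀ (payload : String), Dom_unicode_variations_py payload → Spec_unicode_variations_py payload (unicode_variations_py payload)

-- ===== LEMMAS AND PROOFS =====

-- per-character overlong substitution (what each replace key contributes)
def ovPiece (c : Char) : List Char :=
  match overGet c with
  | some r => r
  | none => [c]

lemma foldl_altStep (l : List Char) :
    ∀ js ov wd ch, l.foldl altStep (js, ov, wd, ch) =
      (js ++ l.map jsEsc, ov ++ l.map ovPiece,
       wd ++ l.map (fun c => if c.toNat < 128 then wideEsc c else [c]), ch || l.any fun c => (overGet c).isSome) := by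
  induction l with
  | nil => intro js ov wd ch; simp
  | cons c t ih =>
    intro js ov wd ch
    simp only [List.foldl_cons, List.map_cons, List.any_cons]
    cases h : overGet c with
    | some r =>
      rw [show altStep (js, ov, wd, ch) c =
        (js ++ [jsEsc c], ov ++ [r], wd ++ [if c.toNat < 128 then wideEsc c else [c]], true) by
          simp [altStep, h]]
      simp [ih, ovPiece, h]
    | none =>
      rw [show altStep (js, ov, wd, ch) c =
        (js ++ [jsEsc c], ov ++ [[c]], wd ++ [if c.toNat < 128 then wideEsc c else [c]], ch) by
          simp [altStep, h]]
      simp [ih, ovPiece, h]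

-- single-character replace is a flatMap substitution
lemma replace_go_single (k : Char) (new : List Char) :
    ∀ (l : List Char) (fuel : Nat) (acc : List Char), l.length ≤ fuel →
      PySem.Chars.replace.go [k] new fuel l acc =
        acc.reverse ++ l.flatMap (fun c => if c = k then new else [c]) := by
  intro l
  induction l with
  | nil =>
    intro fuel acc _
    cases fuel <;> simp [PySem.Chars.replace.go]
  | cons c t ih =>
    intro fuel acc hle
    cases fuel with
    | zero => simp at hle
    | succ fuel =>
      simp only [List.length_cons] at hle
      rw [PySem.Chars.replace.go]
      by_cases hc : c = k
      · subst hc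
        have hpre : List.isPrefixOf [c] (c :: t) = true := by simp [List.isPrefixOf]
        simp only [hpre, if_true]
        rw [show List.drop [c].length (c :: t) = t from by simp]
        rw [ih fuel (new.reverse ++ acc) (by omega)]
        simp [List.flatMap_cons]
      · have hpre : List.isPrefixOf [k] (c :: t) = false := by
          simp [List.isPrefixOf]; exact fun h => (hc h.symm).elim
        simp only [hpre, Bool.false_eq_true, if_false]
        rw [ih fuel (c :: acc) (by omega)]
        simp [List.flatMap_cons, hc]

lemma replace_single (k : Char) (new l : List Char) :
    PySem.Chars.replace l [k] new = l.flatMap (fun c => if c = k then new else [c]) := by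
  rw [PySem.Chars.replace]
  simp only [List.isEmpty_cons, Bool.false_eq_true, if_false]
  rw [replace_go_single k new l l.length [] (le_refl _)]
  simp

-- the six sequential replaces collapse to one substitution pass
lemma chain_eq (l : List Char) :
    overlongPairs.foldl (fun t p => PySem.Chars.replace t p.1 p.2) l = l.flatMap ovPiece := by
  simp only [overlongPairs, List.foldl_cons, List.foldl_nil]
  simp only [replace_single]
  simp only [List.flatMap_assoc]
  apply List.flatMap_congr   -- reduce to per-character equality
  intro c _
  by_cases h1 : c = '<'; · subst h1; decide
  by_cases h2 : c = '>'; · subst h2; decide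
  by_cases h3 : c = '\''; · subst h3; decide
  by_cases h4 : c = '"'; · subst h4; decide
  by_cases h5 : c = '/'; · subst h5; decide
  by_cases h6 : c = '\\'; · subst h6; decide
  simp [ovPiece, overGet, h1, h2, h3, h4, h5, h6]

lemma ovPiece_of_none {c : Char} (h : overGet c = none) : ovPiece c = [c] := by
  simp [ovPiece, h]

lemma ovPiece_len_of_some {c : Char} (h : (overGet c).isSome = true) : (ovPiece c).length = 6 := by
  by_cases h1 : c = '<'; · subst h1; decide
  by_cases h2 : c = '>'; · subst h2; decide
  by_cases h3 : c = '\''; · subst h3; decide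
  by_cases h4 : c = '"'; · subst h4; decide
  by_cases h5 : c = '/'; · subst h5; decide
  by_cases h6 : c = '\\'; · subst h6; decide
  exfalso; simp [overGet, h1, h2, h3, h4, h5, h6] at h

lemma one_le_ovPiece_len (c : Char) : 1 ≤ (ovPiece c).length := by
  cases h : overGet c with
  | some r => rw [show ovPiece c = r from by simp [ovPiece, h]]
              have := ovPiece_len_of_some (c := c) (by simp [h])
              rw [show ovPiece c = r from by simp [ovPiece, h]] at this
              omega
  | none => rw [ovPiece_of_none h]; simp

lemma flatMap_ovPiece_of_not_any {l : List Char}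
    (h : (l.any fun c => (overGet c).isSome) = false) : l.flatMap ovPiece = l := by
  induction l with
  | nil => simp
  | cons c t ih =>
    simp only [List.any_cons, Bool.or_eq_false_iff] at h
    rw [List.flatMap_cons, ih h.2, ovPiece_of_none (Option.not_isSome_iff_eq_none.mp (by simp [h.1]))]
    simp

lemma length_le_flatMap_ovPiece (l : List Char) : l.length ≤ (l.flatMap ovPiece).length := by
  induction l with
  | nil => simp
  | cons c t ih =>
    rw [List.flatMap_cons, List.length_append, List.length_cons]
    have := one_le_ovPiece_len c
    omega

lemma length_lt_of_any {l : List Char}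
    (h : (l.any fun c => (overGet c).isSome) = true) : l.length < (l.flatMap ovPiece).length := by
  induction l with
  | nil => simp at h
  | cons c t ih =>
    rw [List.flatMap_cons, List.length_append, List.length_cons]
    simp only [List.any_cons, Bool.or_eq_true] at h
    cases h with
    | inl hc =>
      have h6 := ovPiece_len_of_some hc
      have := length_le_flatMap_ovPiece t
      omega
    | inr ht =>
      have := ih ht
      have := one_le_ovPiece_len c
      omega

lemma flatMap_ovPiece_ne_iff (l : List Char) :
    (l.flatMap ovPiece ≠ l) ↔ (l.any fun c => (overGet c).isSome) = true := by
  constructor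
  · intro h
    by_contra hb
    exact h (flatMap_ovPiece_of_not_any (Bool.eq_false_iff.mpr hb))
  · intro h heq
    have := length_lt_of_any h
    rw [heq] at this
    omega

-- ===== VERDICT (by name: the statement is the Claim_ definition above) =====
theorem unicode_variations_py_spec : Claim_equal_unicode_variations_py := by
  intro payload _
  unfold Spec_unicode_variations_py unicode_variations_py unicode_variations_py_alt
  simp only [foldl_altStep, chain_eq, List.nil_append, Bool.false_or]
  simp only [← List.flatMap_def]
  by_cases hch : (payload.toList.any fun c => (overGet c).isSome) = true
  · rw [if_pos ((flatMap_ovPiece_ne_iff payload.toList).mpr hch), if_pos hch]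
  · rw [if_neg (fun h => hch ((flatMap_ovPiece_ne_iff payload.toList).mp h)),
        if_neg hch]
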